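-- pv_equiv track=rewrite | github.com/Ashishkumar448/GFG-Problem-of-the-day | 2025-08-August-GFG-POTD/August 13 - Tywin's War Strategy/Solution.py | minSoldiers
-- ===== SOURCE A (Python) =====
-- def minSoldiers(arr, k):
--     n = len(arr)
--     required = (n + 1) // 2  # ceil(n / 2)
--     lucky_count = 0
--     add_list = []
--
--     for num in arr:
--         if num % k == 0:
--             lucky_count += 1
--         else:
--             add_list.append(k - (num % k))
--
--     if lucky_count >= required:
--         return 0
--
--     add_list.sort()
--     to_make_lucky = required - lucky_count
--     soldiers_needed = sum(add_list[:to_make_lucky])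
--
--     return soldiers_needed
-- ===== SOURCE B (Python) =====
-- def _sum_smallest(costs, m):
--     # sum of the m smallest elements, quickselect-style recursive 3-way partition
--     if len(costs) <= m:
--         return sum(costs)
--     pivot = costs[0]
--     less = [c for c in costs if c < pivot]
--     if m <= len(less):
--         return _sum_smallest(less, m)
--     equal = [c for c in costs if c == pivot]
--     if m <= len(less) + len(equal):
--         return sum(less) + (m - len(less)) * pivot
--     greater = [c for c in costs if c > pivot]
--     return sum(less) + len(equal) * pivot + _sum_smallest(greater, m - len(less) - len(equal))
--
--
-- def minSoldiers(arr, k):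
--     costs = [k - num % k for num in arr if num % k != 0]
--     m = (len(arr) + 1) // 2 - (len(arr) - len(costs))
--     if m <= 0:
--         return 0
--     return _sum_smallest(costs, m)
-- ===== Notes on version B (the rewrite author's own statement) =====
-- stated objective: alternative
-- what changed: B never sorts: it computes the sum of the m smallest fill costs by a quickselect-style recursive 3-way partition (less/equal/greater around a pivot), recursing only into the side containing the m-th cost, instead of sorting the whole cost list and summing a prefix.
import Mathlib
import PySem

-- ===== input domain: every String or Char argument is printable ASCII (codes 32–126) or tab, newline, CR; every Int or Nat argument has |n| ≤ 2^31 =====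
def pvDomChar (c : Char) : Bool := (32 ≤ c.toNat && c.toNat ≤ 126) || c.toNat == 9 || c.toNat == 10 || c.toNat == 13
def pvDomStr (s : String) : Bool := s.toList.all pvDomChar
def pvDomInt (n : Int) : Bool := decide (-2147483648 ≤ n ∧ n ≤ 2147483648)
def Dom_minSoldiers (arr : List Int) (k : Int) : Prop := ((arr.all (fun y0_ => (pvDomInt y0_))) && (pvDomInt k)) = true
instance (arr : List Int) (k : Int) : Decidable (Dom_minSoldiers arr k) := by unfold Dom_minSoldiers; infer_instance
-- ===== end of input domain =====

-- B replaces A's full sort of the fill-cost list by a quickselect-style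
-- recursive 3-way partition that sums the m smallest costs directly (alternative algorithm, same values).

-- ===== PORT A =====
def minSoldiers (arr : List Int) (k : Int) : Int :=
  let n : Int := arr.length
  let required := PySem.Int.floordiv (n + 1) 2
  let st := arr.foldl (fun (s : Int × List Int) num =>
      if PySem.Int.mod num k == 0 then (s.1 + 1, s.2)
      else (s.1, s.2 ++ [k - PySem.Int.mod num k])) (0, [])
  if required ≤ st.1 then 0
  else
    let sortedAdd := PySem.List.sorted st.2 (fun x => x) false
    (PySem.List.slice sortedAdd none (some (required - st.1))).sum

-- ===== PORT B =====
-- _sum_smallest: sum of the m smallest elements by 3-way partition around costs[0].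
-- The [] arm is only reachable with m < 0 (where Python's costs[0] would raise IndexError);
-- minSoldiers_alt only ever calls it with m > 0, so the arm's value is irrelevant.
def sumSmallest (costs : List Int) (m : Int) : Int :=
  if (costs.length : Int) ≤ m then costs.sum
  else
    match costs with
    | [] => 0
    | pivot :: rest =>
      let cs := pivot :: rest
      let less := cs.filter (fun c => decide (c < pivot))
      if m ≤ (less.length : Int) then sumSmallest less m
      else
        let equal := cs.filter (fun c => c == pivot)
        if m ≤ (less.length : Int) + (equal.length : Int) then
          less.sum + (m - (less.length : Int)) * pivot
        else
          let greater := cs.filter (fun c => decide (pivot < c))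
          less.sum + (equal.length : Int) * pivot +
            sumSmallest greater (m - (less.length : Int) - (equal.length : Int))
termination_by costs.length
decreasing_by
  · simp only [List.filter_cons, decide_eq_true_eq, lt_irrefl, if_false, List.length_cons]
    exact Nat.lt_succ_of_le (List.length_filter_le _ _)
  · simp only [List.filter_cons, decide_eq_true_eq, lt_irrefl, if_false, List.length_cons]
    exact Nat.lt_succ_of_le (List.length_filter_le _ _)

def minSoldiers_alt (arr : List Int) (k : Int) : Int :=
  let costs := (arr.filter (fun num => !(PySem.Int.mod num k == 0))).map
      (fun num => k - PySem.Int.mod num k)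
  let m := PySem.Int.floordiv ((arr.length : Int) + 1) 2
      - ((arr.length : Int) - (costs.length : Int))
  if m ≤ 0 then 0 else sumSmallest costs m

-- ===== PRECONDITION & SPEC =====
-- Pre_ excludes only k = 0 with a nonempty arr, where Python's '%' raises ZeroDivisionError.
def Pre_minSoldiers (arr : List Int) (k : Int) : Prop := arr = [] ∨ k ≠ 0
instance (arr : List Int) (k : Int) : Decidable (Pre_minSoldiers arr k) := by unfold Pre_minSoldiers; infer_instance
def pvWitness_minSoldiers : List Int × Int := ([3, 1, 4, 6], 3)

def Spec_minSoldiers (arr : List Int) (k : Int) (out : Int) : Prop := out = minSoldiers_alt arr k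
instance (arr : List Int) (k : Int) (out : Int) : Decidable (Spec_minSoldiers arr k out) := by unfold Spec_minSoldiers; infer_instance

-- ===== CLAIM (what is proved, stated in full; the proofs are below) =====
def Claim_equal_minSoldiers : Prop := ∀ (arr : List Int) (k : Int), Dom_minSoldiers arr k → Pre_minSoldiers arr k → Spec_minSoldiers arr k (minSoldiers arr k)

-- ===== LEMMAS AND PROOFS =====

-- the fill costs (k - num % k) of the non-divisible elements, in arr order
def pvFills (arr : List Int) (k : Int) : List Int :=
  (arr.filter (fun num => !(PySem.Int.mod num k == 0))).map (fun num => k - PySem.Int.mod num k)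

-- A's loop: counts the divisible elements and appends the fill costs
theorem pv_foldA (k : Int) : ∀ (l : List Int) (a : Int) (acc : List Int),
    l.foldl (fun (s : Int × List Int) num =>
      if PySem.Int.mod num k == 0 then (s.1 + 1, s.2)
      else (s.1, s.2 ++ [k - PySem.Int.mod num k])) (a, acc)
    = (a + (l.countP (fun num => PySem.Int.mod num k == 0) : Int), acc ++ pvFills l k) := by
  intro l
  induction l with
  | nil => intro a acc; simp [pvFills]
  | cons x t ih =>
    intro a acc
    rw [List.foldl_cons]
    by_cases hx : PySem.Int.mod x k = 0
    · have hstep : (if PySem.Int.mod x k == 0 then ((a:Int) + 1, acc) else (a, acc ++ [k - PySem.Int.mod x k])) = (a + 1, acc) := by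
        simp [hx]
      rw [hstep, ih]
      simp [pvFills, hx]
      omega
    · have hstep : (if PySem.Int.mod x k == 0 then ((a:Int) + 1, acc) else (a, acc ++ [k - PySem.Int.mod x k])) = (a, acc ++ [k - PySem.Int.mod x k]) := by
        simp [hx]
      rw [hstep, ih]
      simp [pvFills, hx]

-- three-way partition of sorted(cs) around a pivot that occurs in cs
theorem pv_sorted_split (cs : List Int) (p : Int) (hp : p ∈ cs) :
    PySem.List.sorted cs (fun x => x) false
    = PySem.List.sorted (cs.filter (fun c => decide (c < p))) (fun x => x) false
      ++ cs.filter (fun c => c == p)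
      ++ PySem.List.sorted (cs.filter (fun c => decide (p < c))) (fun x => x) false := by
  set less := cs.filter (fun c => decide (c < p)) with hless
  set equal := cs.filter (fun c => c == p) with hequal
  set greater := cs.filter (fun c => decide (p < c)) with hgreater
  set Ls := PySem.List.sorted less (fun x => x) false with hLs
  set Gs := PySem.List.sorted greater (fun x => x) false with hGs
  have hmemL : ∀ x ∈ Ls, x < p := by
    intro x hx
    rw [hLs, PySem.List.mem_sorted, hless, List.mem_filter] at hx
    simpa using hx.2
  have hmemE : ∀ x ∈ equal, x = p := by
    intro x hx
    rw [hequal, List.mem_filter] at hx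
    simpa using hx.2
  have hmemG : ∀ x ∈ Gs, p < x := by
    intro x hx
    rw [hGs, PySem.List.mem_sorted, hgreater, List.mem_filter] at hx
    simpa using hx.2
  apply PySem.List.sorted_id_eq_of_perm_of_pairwise
  · -- permutation: Ls ++ equal ++ Gs ~ cs
    have h1 : (Ls ++ (equal ++ Gs)).Perm (less ++ (equal ++ greater)) := by
      exact List.Perm.append (PySem.List.sorted_perm _ _ _)
        (List.Perm.append (List.Perm.refl _) (PySem.List.sorted_perm _ _ _))
    have h2 : (less ++ (equal ++ greater)).Perm cs := by
      rw [List.perm_iff_count]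
      intro v
      simp only [List.count_append, hless, hequal, hgreater]
      have cf0 : ∀ (q : Int → Bool), q v = false → (cs.filter q).count v = 0 := by
        intro q hq
        refine List.count_eq_zero.mpr (fun hm => ?_)
        have h' := (List.mem_filter.mp hm).2
        rw [hq] at h'
        exact Bool.noConfusion h'
      rcases lt_trichotomy v p with h | h | h
      · rw [List.count_filter (by simpa using h), cf0 _ (by simp; omega), cf0 _ (by simp; omega)]
        omega
      · subst h
        rw [cf0 _ (by simp), List.count_filter (by simp), cf0 _ (by simp)]
        omega
      · rw [cf0 _ (by simp; omega), cf0 _ (by simp; omega), List.count_filter (by simpa using h)]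
        omega
    simpa using h1.trans h2
  · -- pairwise ≤
    rw [List.append_assoc] at *
    rw [List.pairwise_append]
    refine ⟨PySem.List.sorted_pairwise _ _, ?_, ?_⟩
    · rw [List.pairwise_append]
      refine ⟨?_, PySem.List.sorted_pairwise _ _, ?_⟩
      · exact List.pairwise_of_forall_mem_list
          (fun a ha b hb => by rw [hmemE a ha, hmemE b hb])
      · intro a ha b hb
        have := hmemE a ha; have := hmemG b hb; omega
    · intro a ha b hb
      have ha' := hmemL a ha
      rcases List.mem_append.mp hb with hb' | hb'
      · have := hmemE b hb'; omega
      · have := hmemG b hb'; omega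

-- sumSmallest computes the sum of the first m of the sorted list
theorem pv_sumSmallest_eq : ∀ (N : ℕ) (cs : List Int) (m : Int), cs.length ≤ N →
    sumSmallest cs m = ((PySem.List.sorted cs (fun x => x) false).take m.toNat).sum := by
  intro N
  induction N with
  | zero =>
    intro cs m hN
    have hnil : cs = [] := List.length_eq_zero_iff.mp (Nat.le_zero.mp hN)
    subst hnil
    have hs : PySem.List.sorted ([] : List Int) (fun x => x) false = [] := rfl
    rw [sumSmallest.eq_def]
    simp only [List.length_nil, Nat.cast_zero, List.sum_nil, hs, List.take_nil]
    split
    · rfl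
    · rfl
  | succ N ih =>
    intro cs m hN
    rw [sumSmallest.eq_def]
    by_cases h0 : (cs.length : Int) ≤ m
    · rw [if_pos h0]
      have hlen : (PySem.List.sorted cs (fun x => x) false).length ≤ m.toNat := by
        rw [PySem.List.length_sorted]; omega
      rw [List.take_of_length_le hlen]
      exact ((PySem.List.sorted_perm cs (fun x => x) false).sum_eq).symm
    · rw [if_neg h0]
      match cs with
      | [] =>
        have hs : PySem.List.sorted ([] : List Int) (fun x => x) false = [] := rfl
        simp only [hs, List.take_nil, List.sum_nil]
      | pivot :: rest =>
        simp only []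
        set cs' := pivot :: rest with hcs
        set less := cs'.filter (fun c => decide (c < pivot)) with hless
        set equal := cs'.filter (fun c => c == pivot) with hequal
        set greater := cs'.filter (fun c => decide (pivot < c)) with hgreater
        have hsplit := pv_sorted_split cs' pivot (by simp [hcs])
        rw [← hless, ← hequal, ← hgreater] at hsplit
        set Ls := PySem.List.sorted less (fun x => x) false with hLs
        set Gs := PySem.List.sorted greater (fun x => x) false with hGs
        have hLlen : Ls.length = less.length := PySem.List.length_sorted _ _ _
        have hGlen : Gs.length = greater.length := PySem.List.length_sorted _ _ _
        have hlessN : less.length ≤ N := by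
          have : less.length < cs'.length := by
            rw [hless, hcs]
            simp only [List.filter_cons, decide_eq_true_eq, lt_irrefl, if_false, List.length_cons]
            exact Nat.lt_succ_of_le (List.length_filter_le _ _)
          omega
        have hgreaterN : greater.length ≤ N := by
          have : greater.length < cs'.length := by
            rw [hgreater, hcs]
            simp only [List.filter_cons, decide_eq_true_eq, lt_irrefl, if_false, List.length_cons]
            exact Nat.lt_succ_of_le (List.length_filter_le _ _)
          omega
        by_cases h1 : m ≤ (less.length : Int)
        · rw [if_pos h1, ih less m hlessN, hsplit, List.append_assoc]
          rw [List.take_append_of_le_length (by rw [hLlen]; omega)]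
        · rw [if_neg h1]
          have hm0 : 0 < m := by omega
          rw [hsplit, List.append_assoc, List.take_append,
            List.take_of_length_le (by rw [hLlen]; omega)]
          have hEall : ∀ x ∈ equal, x = pivot := by
            intro x hx
            rw [hequal, List.mem_filter] at hx
            simpa using hx.2
          by_cases h2 : m ≤ (less.length : Int) + (equal.length : Int)
          · rw [if_pos h2]
            rw [List.take_append_of_le_length (by omega : m.toNat - Ls.length ≤ equal.length)]
            rw [List.sum_append]
            have hsumL : Ls.sum = less.sum := (PySem.List.sorted_perm _ _ _).sum_eq
            have htakeE : ∀ x ∈ equal.take (m.toNat - Ls.length), x = pivot := by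
              intro x hx; exact hEall x (List.mem_of_mem_take hx)
            rw [List.sum_eq_card_nsmul _ pivot htakeE]
            rw [List.length_take, hsumL]
            have : min (m.toNat - Ls.length) equal.length = m.toNat - Ls.length := by omega
            rw [this]
            have : ((m.toNat - Ls.length : ℕ) : Int) = m - (less.length : Int) := by
              rw [hLlen]; omega
            simp [this]
          · rw [if_neg h2]
            rw [List.take_append, List.take_of_length_le (by omega : equal.length ≤ m.toNat - Ls.length)]
            rw [List.sum_append, List.sum_append]
            have hsumL : Ls.sum = less.sum := (PySem.List.sorted_perm _ _ _).sum_eq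
            rw [List.sum_eq_card_nsmul _ pivot hEall]
            rw [ih greater (m - (less.length : Int) - (equal.length : Int)) hgreaterN]
            have : (m - (less.length : Int) - (equal.length : Int)).toNat
                = m.toNat - Ls.length - equal.length := by rw [hLlen]; omega
            rw [this, hsumL]
            simp
            ring

-- the two programs agree on every input where neither raises
theorem pv_main (arr : List Int) (k : Int) : minSoldiers arr k = minSoldiers_alt arr k := by
  unfold minSoldiers minSoldiers_alt
  rw [pv_foldA k arr 0 []]
  simp only [List.nil_append, zero_add]
  set F := pvFills arr k with hF
  set lucky : Int := (arr.countP (fun num => PySem.Int.mod num k == 0) : Int) with hlucky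
  set req := PySem.Int.floordiv ((arr.length : Int) + 1) 2 with hreq
  have hFdef : (arr.filter (fun num => !(PySem.Int.mod num k == 0))).map
      (fun num => k - PySem.Int.mod num k) = F := by rw [hF, pvFills]
  rw [hFdef]
  have hlen : (F.length : Int) = (arr.length : Int) - lucky := by
    rw [hF, pvFills, List.length_map]
    rw [hlucky]
    have h2 : ∀ l : List Int, l.countP (fun num => !(PySem.Int.mod num k == 0))
        + l.countP (fun num => PySem.Int.mod num k == 0) = l.length := by
      intro l
      induction l with
      | nil => rfl
      | cons x t ih =>
        by_cases hx : PySem.Int.mod x k == 0 <;> simp [hx] <;> omega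
    rw [← List.countP_eq_length_filter]
    have := h2 arr
    omega
  have hm : req - ((arr.length : Int) - (F.length : Int)) = req - lucky := by omega
  rw [hm]
  by_cases hcase : req ≤ lucky
  · rw [if_pos hcase, if_pos (by omega : req - lucky ≤ 0)]
  · rw [if_neg hcase, if_neg (by omega : ¬ req - lucky ≤ 0)]
    rw [pv_sumSmallest_eq F.length F (req - lucky) (le_refl _)]
    have h1 : req - lucky = (((req - lucky).toNat : ℕ) : Int) := by omega
    rw [h1, PySem.List.slice_to_natCast, Int.toNat_natCast]

-- ===== VERDICT (by name: the statement is the Claim_ definition above) =====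
theorem minSoldiers_spec : Claim_equal_minSoldiers := by
  intro arr k _ _
  unfold Spec_minSoldiers
  exact pv_main arr k
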